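-- pv_equiv track=rewrite | github.com/ashtamikn/Python | hackkerrank/ADA/implementation/diff_1.py | pickingNumbers
-- ===== SOURCE A (Python) =====
-- def pickingNumbers(a):
--     # Write your code here
--     ma=0
--     for i in a:
--         n=a.count(i)
--         m=a.count(i-1)
--         c=n+m
--         if(c>ma):
--             ma=c
--     return ma
-- ===== SOURCE B (Python) =====
-- def pickingNumbers(a):
--     # Sort once, then walk runs of equal values: each candidate is the length of a
--     # run of v together with the length of an immediately following run of v+1.
--     s = sorted(a)
--     n = len(s)
--     best = 0
--     i = 0
--     while i < n:
--         v = s[i]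
--         j = i + 1
--         while j < n and s[j] == v:
--             j += 1
--         k = j
--         while k < n and s[k] == v + 1:
--             k += 1
--         if k - i > best:
--             best = k - i
--         i = j
--     return best
-- ===== Notes on version B (the rewrite author's own statement) =====
-- stated objective: faster
-- what changed: Replaces the per-element full-list count() scans with sort-then-run-scan: sort once, walk maximal runs of equal values with index pointers, and take the best length of a run plus an immediately adjacent run of the successor value.
import Mathlib
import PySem

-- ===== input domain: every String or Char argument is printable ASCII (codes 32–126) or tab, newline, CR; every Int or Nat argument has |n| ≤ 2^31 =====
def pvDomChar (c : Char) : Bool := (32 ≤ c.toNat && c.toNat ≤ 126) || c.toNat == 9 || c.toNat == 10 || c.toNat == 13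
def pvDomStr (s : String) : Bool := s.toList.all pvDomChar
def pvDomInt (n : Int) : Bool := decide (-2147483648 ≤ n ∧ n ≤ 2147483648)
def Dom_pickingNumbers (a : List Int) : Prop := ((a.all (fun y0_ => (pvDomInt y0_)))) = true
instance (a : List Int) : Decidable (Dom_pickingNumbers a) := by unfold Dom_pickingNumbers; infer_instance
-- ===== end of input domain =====

-- B sorts once and walks maximal runs of equal values (run of v plus an adjacent
-- run of v+1), instead of A's per-element full-list count() scans; the timing
-- run measures the asymptotic speed-up.

-- ===== PORT A =====
def pickingNumbers (a : List Int) : Int :=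
  a.foldl (fun ma i =>
    let n : Int := (PySem.List.count a i : Int)
    let m : Int := (PySem.List.count a (i - 1) : Int)
    let c := n + m
    if c > ma then c else ma) 0

-- ===== PORT B =====
-- the inner `while j < n and s[j] == v: j += 1` scan: (length of the leading run
-- of v, the remainder of the list)
def pvRun (v : Int) : List Int → Nat × List Int
  | [] => (0, [])
  | x :: t => if x = v then ((pvRun v t).1 + 1, (pvRun v t).2) else (0, x :: t)

theorem pvRun_snd_length_le (v : Int) (l : List Int) : (pvRun v l).2.length ≤ l.length := by
  induction l with
  | nil => simp [pvRun]
  | cons x t ih => by_cases h : x = v <;> simp [pvRun, h] <;> try omega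

-- the outer `while i < n` loop of Source B over the tail of the sorted list:
-- v = head, its run covers the head plus (pvRun v t).1 more, then the
-- adjacent run of v+1; continue at the start of that run (i = j)
def pvScanB : List Int → Int → Int
  | [], best => best
  | x :: t, best =>
      let p := pvRun x t
      let q := pvRun (x + 1) p.2
      let tv : Int := ((p.1 + 1 + q.1 : Nat) : Int)
      pvScanB p.2 (if tv > best then tv else best)
termination_by l _ => l.length
decreasing_by
  simpa using Nat.lt_succ_of_le (pvRun_snd_length_le x t)

def pickingNumbers_alt (a : List Int) : Int :=
  pvScanB (PySem.List.sorted a (fun x => x) false) 0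

-- ===== PRECONDITION & SPEC =====
def Spec_pickingNumbers (a : List Int) (out : Int) : Prop := out = pickingNumbers_alt a
instance (a : List Int) (out : Int) : Decidable (Spec_pickingNumbers a out) := by unfold Spec_pickingNumbers; infer_instance

-- ===== CLAIM (what is proved, stated in full; the proofs are below) =====
def Claim_equal_pickingNumbers : Prop := ∀ (a : List Int), Dom_pickingNumbers a → Spec_pickingNumbers a (pickingNumbers a)

-- ===== LEMMAS AND PROOFS =====

-- a max-update step is `max`
theorem pvStep_eq_max (ma c : Int) : (if c > ma then c else ma) = max ma c := by
  split_ifs <;> omega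

-- A's loop is a running max of count(i) + count(i-1)
theorem pickingNumbers_eq_max (a : List Int) :
    pickingNumbers a
      = a.foldl (fun acc x => max acc ((a.count x : Int) + (a.count (x - 1) : Int))) 0 := by
  simp only [pickingNumbers]
  apply PySem.List.foldl_congr_mem
  intro acc x _
  simp only [PySem.List.count_eq, pvStep_eq_max]

-- pvRun splits off the leading run
theorem pvRun_decomp (v : Int) (l : List Int) :
    l = List.replicate (pvRun v l).1 v ++ (pvRun v l).2 := by
  induction l with
  | nil => simp [pvRun]
  | cons x t ih =>
      by_cases h : x = v
      · subst h; simpa [pvRun, List.replicate_succ] using ih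
      · simp [pvRun, h]

-- on a sorted list all of whose elements are ≥ v, pvRun v returns exactly
-- count v, and the remainder is sorted, strictly above v, with unchanged
-- counts of every value above v
theorem pvRun_facts (v : Int) (l : List Int)
    (hs : l.Pairwise (· ≤ ·)) (hge : ∀ y ∈ l, v ≤ y) :
    ((pvRun v l).1 : Int) = l.count v ∧
    (pvRun v l).2.Pairwise (· ≤ ·) ∧
    (∀ y ∈ (pvRun v l).2, v < y) ∧
    (∀ w : Int, v < w → (pvRun v l).2.count w = l.count w) := by
  induction l with
  | nil => simp [pvRun]
  | cons x t ih =>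
      have hxt : ∀ y ∈ t, x ≤ y := (List.pairwise_cons.mp hs).1
      have hst : t.Pairwise (· ≤ ·) := (List.pairwise_cons.mp hs).2
      by_cases h : x = v
      · subst h
        obtain ⟨h1, h2, h3, h4⟩ := ih hst hxt
        have hrw : pvRun x (x :: t) = ((pvRun x t).1 + 1, (pvRun x t).2) := by
          simp [pvRun]
        rw [hrw]
        dsimp only
        refine ⟨?_, h2, h3, ?_⟩
        · rw [List.count_cons_self]; push_cast; omega
        · intro w hw
          have h5 := h4 w hw
          simp [List.count_cons, h5]
          omega
      · have hvx : v < x := lt_of_le_of_ne (hge x (by simp)) (fun hh => h hh.symm)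
        have hnm : v ∉ x :: t := by
          intro hm
          rcases List.mem_cons.mp hm with rfl | hm
          · exact absurd rfl h
          · exact absurd (hxt v hm) (by omega)
        have hrw : pvRun v (x :: t) = (0, x :: t) := by simp [pvRun, h]
        rw [hrw]
        dsimp only
        refine ⟨by simp [List.count_eq_zero.mpr hnm], hs, ?_, fun w _ => rfl⟩
        intro y hy
        rcases List.mem_cons.mp hy with rfl | hy
        · exact hvx
        · exact lt_of_lt_of_le hvx (hxt y hy)

-- fold of a running max over a constant run keeps the already-updated max
theorem pvFoldlMax_replicate (f : Int → Int) (n : Nat) (x : Int) (b : Int) :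
    (List.replicate n x).foldl (fun acc y => max acc (f y)) (max b (f x)) = max b (f x) := by
  induction n with
  | zero => rfl
  | succ m ih => simpa [List.replicate_succ, max_assoc] using ih

-- the scan over the sorted list is the running max of count v + count (v+1)
theorem pvScanB_eq (n : Nat) : ∀ (l : List Int), l.length ≤ n → l.Pairwise (· ≤ ·) →
    ∀ best : Int,
      pvScanB l best
        = l.foldl (fun acc x => max acc ((l.count x : Int) + (l.count (x + 1) : Int))) best := by
  induction n with
  | zero =>
      intro l hl _ best
      have : l = [] := List.eq_nil_of_length_eq_zero (Nat.le_zero.mp hl)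
      subst this; simp [pvScanB]
  | succ m ih =>
      intro l hl hs best
      match l with
      | [] => simp [pvScanB]
      | x :: t =>
        have hxt : ∀ y ∈ t, x ≤ y := (List.pairwise_cons.mp hs).1
        have hst : t.Pairwise (· ≤ ·) := (List.pairwise_cons.mp hs).2
        obtain ⟨hp1, hp2, hp3, hp4⟩ := pvRun_facts x t hst hxt
        have hdec := pvRun_decomp x t
        have hlen0 := pvRun_snd_length_le x t
        rcases hpr : pvRun x t with ⟨rn, rest⟩
        rw [hpr] at hp1 hp2 hp3 hp4 hdec hlen0
        dsimp only at hp1 hp2 hp3 hp4 hdec hlen0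
        have hq0 : ∀ y ∈ rest, x + 1 ≤ y := fun y hy => by
          have := hp3 y hy; omega
        obtain ⟨hq1, -, -, -⟩ := pvRun_facts (x + 1) rest hp2 hq0
        have hlen : rest.length ≤ m := by simp at hl; omega
        -- the candidate of this run equals count x + count (x+1) over x :: t
        have hcx : ((x :: t).count x : Int) = (rn : Int) + 1 := by
          rw [List.count_cons_self]; push_cast; omega
        have hcx1 : ((x :: t).count (x + 1) : Int) = ((pvRun (x + 1) rest).1 : Int) := by
          have h1 : (x :: t).count (x + 1) = t.count (x + 1) := by
            simp
          rw [h1, ← hp4 (x + 1) (by omega), ← hq1]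
        -- one step of pvScanB, then the induction hypothesis on the remainder
        rw [pvScanB, hpr]
        dsimp only
        simp only [pvStep_eq_max]
        rw [ih rest hlen hp2]
        -- the RHS fold absorbs the whole leading run into one max step
        have habs : ∀ (f : Int → Int) (b : Int),
            List.foldl (fun acc y => max acc (f y)) b (x :: t)
              = List.foldl (fun acc y => max acc (f y)) (max b (f x)) rest := by
          intro f b
          rw [List.foldl_cons]
          show List.foldl (fun acc y => max acc (f y)) (max b (f x)) t = _
          rw [hdec, List.foldl_append, pvFoldlMax_replicate]
        rw [habs]
        have hinit : max best ((((rn + 1 + (pvRun (x + 1) rest).1 : Nat)) : Int))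
            = max best (((x :: t).count x : Int) + ((x :: t).count (x + 1) : Int)) := by
          rw [hcx, hcx1]; push_cast; ring_nf
        rw [← hinit]
        -- counts over x :: t agree with counts over the remainder for its elements
        apply PySem.List.foldl_congr_mem
        intro acc y hy
        have hyx : x < y := hp3 y hy
        have hy1 : (x :: t).count y = rest.count y := by
          rw [hp4 y hyx]
          simp [List.count_cons]
          omega
        have hy2 : (x :: t).count (y + 1) = rest.count (y + 1) := by
          rw [hp4 (y + 1) (by omega)]
          simp [List.count_cons]
          omega
        rw [hy1, hy2]

-- two running maxes from 0 agree when each candidate is dominated by one of the other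
theorem pvFoldlMax_eq_of_dominates (f g : Int → Int) (l₁ l₂ : List Int)
    (h₁ : ∀ x ∈ l₁, ∃ y ∈ l₂, f x ≤ g y)
    (h₂ : ∀ y ∈ l₂, ∃ x ∈ l₁, g y ≤ f x) :
    l₁.foldl (fun acc x => max acc (f x)) 0 = l₂.foldl (fun acc x => max acc (g x)) 0 := by
  have key : ∀ (f g : Int → Int) (l₁ l₂ : List Int),
      (∀ x ∈ l₁, ∃ y ∈ l₂, f x ≤ g y) →
      l₁.foldl (fun acc x => max acc (f x)) 0 ≤ l₂.foldl (fun acc x => max acc (g x)) 0 := by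
    intro f g l₁ l₂ h
    have hmap : ∀ (f : Int → Int) (l : List Int),
        l.foldl (fun acc x => max acc (f x)) 0 = (l.map f).foldl max 0 := by
      intro f l; rw [List.foldl_map]
    rw [hmap f l₁]
    rcases PySem.List.foldl_max_mem (l₁.map f) 0 with heq | hmem
    · rw [heq]; exact (PySem.List.le_foldl_max_int l₂ g 0).1
    · rcases List.mem_map.mp hmem with ⟨x, hx, hfx⟩
      rw [← hfx]
      rcases h x hx with ⟨y, hy, hle⟩
      exact le_trans hle ((PySem.List.le_foldl_max_int l₂ g 0).2 y hy)
  exact le_antisymm (key f g l₁ l₂ h₁) (key g f l₂ l₁ h₂)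

-- ===== VERDICT (by name: the statement is the Claim_ definition above) =====
theorem pickingNumbers_spec : Claim_equal_pickingNumbers := by
  intro a _
  unfold Spec_pickingNumbers pickingNumbers_alt
  set s := PySem.List.sorted a (fun x => x) false with hsdef
  have hperm : s.Perm a := PySem.List.sorted_perm a (fun x => x) false
  have hs : s.Pairwise (· ≤ ·) := by
    simpa using PySem.List.sorted_pairwise a (fun x => x)
  have hcnt : ∀ v : Int, s.count v = a.count v := fun v => hperm.count_eq v
  have hmem : ∀ v : Int, v ∈ s ↔ v ∈ a := fun v => hperm.mem_iff
  rw [pickingNumbers_eq_max, pvScanB_eq s.length s le_rfl hs 0]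
  have hrw : s.foldl (fun acc x => max acc ((s.count x : Int) + (s.count (x + 1) : Int))) 0
      = s.foldl (fun acc x => max acc ((a.count x : Int) + (a.count (x + 1) : Int))) 0 := by
    apply PySem.List.foldl_congr_mem
    intro acc x _; rw [hcnt x, hcnt (x + 1)]
  rw [hrw]
  apply pvFoldlMax_eq_of_dominates
  · -- each A-candidate count x + count (x-1) is matched in s
    intro x hx
    by_cases hm : x - 1 ∈ a
    · exact ⟨x - 1, (hmem (x - 1)).mpr hm, by simp; omega⟩
    · refine ⟨x, (hmem x).mpr hx, ?_⟩
      rw [List.count_eq_zero.mpr hm]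
      have : (0 : Int) ≤ (a.count (x + 1) : Int) := Int.natCast_nonneg _
      omega
  · -- each B-candidate count v + count (v+1) is matched in a
    intro v hv
    by_cases hm : v + 1 ∈ a
    · exact ⟨v + 1, hm, by simp; omega⟩
    · refine ⟨v, (hmem v).mp hv, ?_⟩
      rw [List.count_eq_zero.mpr hm]
      have : (0 : Int) ≤ (a.count (v - 1) : Int) := Int.natCast_nonneg _
      omega
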